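-- pv_equiv track=rewrite | github.com/pkkm/dmenu-mounter | dmenu-mounter.py | prepare_table
-- ===== SOURCE A (Python) =====
-- def prepare_table(table, delete_none_columns=True):
--     """Assuming that `table` is a list of lists representing a table, return the
--     table with columns that contain only `None` removed, and remaining cells
--     that are `None` replaced with the empty string.
--     """
--
--     if not table:
--         return table
--
--     n_columns = len(table[0])
--
--     if delete_none_columns:
--         should_delete_column = [True] * n_columns
--         for i_column in range(n_columns):
--             for row in table:
--                 if row[i_column] is not None:
--                     should_delete_column[i_column] = False
--     else:
--         should_delete_column = [False] * n_columns
--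
--     result = []
--     for row in table:
--         new_row = []
--         for i_column, cell in enumerate(row):
--             if should_delete_column[i_column]:
--                 continue
--
--             if cell is None:
--                 new_row.append("")
--             else:
--                 new_row.append(cell)
--
--         result.append(new_row)
--
--     return result
-- ===== SOURCE B (Python) =====
-- def prepare_table(table, delete_none_columns=True):
--     """Column-wise rewrite: transpose with zip, drop all-None columns, and
--     rebuild one output row per input row."""
--     if not table:
--         return table
--     if not delete_none_columns:
--         return [["" if cell is None else cell for cell in row] for row in table]
--     columns = [c for c in zip(*table) if any(x is not None for x in c)]
--     return [["" if c[j] is None else c[j] for c in columns]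
--             for j in range(len(table))]
-- ===== Notes on version B (the rewrite author's own statement) =====
-- stated objective: simpler
-- what changed: B works column-wise: it transposes the table with zip(*table), keeps the columns containing any non-None cell, and rebuilds each output row by indexing the kept columns, instead of A's per-index boolean deletion mask computed by nested loops and a row-by-row append loop.
import Mathlib
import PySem

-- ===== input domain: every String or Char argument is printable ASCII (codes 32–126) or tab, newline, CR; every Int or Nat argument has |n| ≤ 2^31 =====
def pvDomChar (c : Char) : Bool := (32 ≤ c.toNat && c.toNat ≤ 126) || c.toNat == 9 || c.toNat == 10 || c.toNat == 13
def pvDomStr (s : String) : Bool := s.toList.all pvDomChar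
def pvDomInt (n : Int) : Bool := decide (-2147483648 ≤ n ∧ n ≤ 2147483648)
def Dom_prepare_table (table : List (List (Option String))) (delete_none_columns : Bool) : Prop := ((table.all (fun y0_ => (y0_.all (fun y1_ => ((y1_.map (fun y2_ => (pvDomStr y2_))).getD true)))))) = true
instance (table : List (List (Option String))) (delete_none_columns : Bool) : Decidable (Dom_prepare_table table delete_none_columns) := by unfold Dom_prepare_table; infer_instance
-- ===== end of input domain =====

-- B rebuilds the table column-wise (transpose, drop all-None columns, re-index) instead of
-- A's per-index deletion mask; objective: simpler. Return-value equivalence only (no mutation).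

-- ===== PORT A =====
def prepare_table (table : List (List (Option String))) (delete_none_columns : Bool) : List (List String) :=
  match table with
  | [] => []
  | r :: _ =>
    let n := r.length
    let should_delete_column : List Bool :=
      if delete_none_columns then
        (List.range n).foldl
          (fun sd i_column =>
            table.foldl
              (fun sd row =>
                if (row.getD i_column none).isSome then sd.set i_column false else sd)
              sd)
          (List.replicate n true)
      else
        List.replicate n false
    table.foldl
      (fun result row =>
        result ++
          [(PySem.List.enumerate row 0).foldl
            (fun new_row p =>
              if PySem.List.pyGetD should_delete_column p.1 true then new_row
              else new_row ++ [p.2.getD ""])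
            []])
      []

-- ===== PORT B =====
def prepare_table_alt (table : List (List (Option String))) (delete_none_columns : Bool) : List (List String) :=
  match table with
  | [] => []
  | r :: _ =>
    if !delete_none_columns then
      table.map (fun row => row.map (fun cell => cell.getD ""))
    else
      -- zip(*table) truncates every row to the shortest length
      let m := table.foldl (fun acc row => min acc row.length) r.length
      let columns :=
        ((List.range m).map (fun i => table.map (fun row => row.getD i none))).filter
          (fun c => c.any (fun x => x.isSome))
      (List.range table.length).map
        (fun j => columns.map (fun c => (c.getD j none).getD ""))

-- ===== PRECONDITION & SPEC =====
-- Pre_ excludes exactly the ragged tables on which A raises IndexError: with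
-- delete_none_columns, any row whose length differs from the first row's; without
-- it, any row longer than the first row.
def Pre_prepare_table (table : List (List (Option String))) (delete_none_columns : Bool) : Prop :=
  ∀ row ∈ table,
    if delete_none_columns then row.length = (table.headD []).length
    else row.length ≤ (table.headD []).length
instance (table : List (List (Option String))) (delete_none_columns : Bool) : Decidable (Pre_prepare_table table delete_none_columns) := by unfold Pre_prepare_table; infer_instance

def pvWitness_prepare_table : List (List (Option String)) × Bool :=
  ([[some "a", none], [none, none]], true)

def Spec_prepare_table (table : List (List (Option String))) (delete_none_columns : Bool) (out : List (List String)) : Prop := out = prepare_table_alt table delete_none_columns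
instance (table : List (List (Option String))) (delete_none_columns : Bool) (out : List (List String)) : Decidable (Spec_prepare_table table delete_none_columns out) := by unfold Spec_prepare_table; infer_instance

-- ===== CLAIM (what is proved, stated in full; the proofs are below) =====
def Claim_equal_prepare_table : Prop := ∀ (table : List (List (Option String))) (delete_none_columns : Bool), Dom_prepare_table table delete_none_columns → Pre_prepare_table table delete_none_columns → Spec_prepare_table table delete_none_columns (prepare_table table delete_none_columns)

-- ===== LEMMAS AND PROOFS =====

-- the inner mask loop over the rows repeatedly sets index i; its net effect is one set (or none)
lemma innerFold (t : List (List (Option String))) (i : Nat) (sd : List Bool) :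
    t.foldl (fun sd row => if (row.getD i none).isSome then sd.set i false else sd) sd
      = if t.any (fun row => (row.getD i none).isSome) then sd.set i false else sd := by
  induction t generalizing sd with
  | nil => simp
  | cons row t ih =>
    rw [List.foldl_cons, ih]
    simp only [List.any_cons]
    by_cases h : (row.getD i none).isSome = true
    · rw [if_pos h]
      by_cases ht : (t.any fun row => (row.getD i none).isSome) = true
      · rw [if_pos ht, List.set_set,
          if_pos (show ((row.getD i none).isSome
              || t.any fun row => (row.getD i none).isSome) = true from
            by rw [Bool.or_eq_true]; exact Or.inl h)]
      · rw [if_neg ht,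
          if_pos (show ((row.getD i none).isSome
              || t.any fun row => (row.getD i none).isSome) = true from
            by rw [Bool.or_eq_true]; exact Or.inl h)]
    · rw [if_neg h]
      by_cases ht : (t.any fun row => (row.getD i none).isSome) = true
      · rw [if_pos ht,
          if_pos (show ((row.getD i none).isSome
              || t.any fun row => (row.getD i none).isSome) = true from
            by rw [Bool.or_eq_true]; exact Or.inr ht)]
      · rw [if_neg ht,
          if_neg (show ¬((row.getD i none).isSome
              || t.any fun row => (row.getD i none).isSome) = true from
            by rw [Bool.or_eq_true]; rintro (hc | hc); exacts [h hc, ht hc])]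

-- the whole mask loop, read back cell by cell
lemma outerFold (t : List (List (Option String))) (L : List Nat) (sd : List Bool) (j : Nat)
    (hj : j < sd.length) :
    ((L.foldl
        (fun sd i =>
          t.foldl (fun sd row => if (row.getD i none).isSome then sd.set i false else sd) sd)
        sd).getD j true)
      = if j ∈ L ∧ t.any (fun row => (row.getD j none).isSome) then false else sd.getD j true := by
  induction L generalizing sd with
  | nil => simp
  | cons i L ih =>
    rw [List.foldl_cons, innerFold]
    by_cases hP : (t.any fun row => (row.getD i none).isSome) = true
    · rw [if_pos hP, ih _ (by simpa using hj)]
      by_cases hji : j = i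
      · subst hji
        have hgd : (sd.set j false).getD j true = false := by
          rw [List.getD_eq_getElem?_getD, List.getElem?_set_eq_of_lt _ hj]; rfl
        rw [hgd,
          if_pos (show j ∈ j :: L ∧ (t.any fun row => (row.getD j none).isSome) = true from
            ⟨by simp, hP⟩)]
        split_ifs <;> rfl
      · have hgd : (sd.set i false).getD j true = sd.getD j true := by
          rw [List.getD_eq_getElem?_getD, List.getElem?_set_ne (fun h => hji h.symm),
            ← List.getD_eq_getElem?_getD]
        have hmem : (j ∈ i :: L) = (j ∈ L) := by simp [List.mem_cons, hji]
        rw [hgd]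
        simp only [hmem]
    · rw [if_neg hP, ih _ hj]
      by_cases hji : j = i
      · subst hji
        have h2 : ¬(j ∈ j :: L ∧ (t.any fun row => (row.getD j none).isSome) = true) :=
          fun hc => hP hc.2
        have h1 : ¬(j ∈ L ∧ (t.any fun row => (row.getD j none).isSome) = true) :=
          fun hc => hP hc.2
        rw [if_neg h2, if_neg h1]
      · have hmem : (j ∈ i :: L) = (j ∈ L) := by simp [List.mem_cons, hji]
        simp only [hmem]

-- the row-building loop is an append of the filtered, mapped enumeration
lemma rowFold (sd : List Bool) (row : List (Option String)) (s : Int) (acc : List String) :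
    (PySem.List.enumerate row s).foldl
        (fun new_row p =>
          if PySem.List.pyGetD sd p.1 true then new_row else new_row ++ [p.2.getD ""])
        acc
      = acc ++ (((PySem.List.enumerate row s).filter
            (fun p => !(PySem.List.pyGetD sd p.1 true))).map (fun p => p.2.getD "")) := by
  induction row generalizing s acc with
  | nil => simp [PySem.List.enumerate_nil]
  | cons x row ih =>
    rw [PySem.List.enumerate_cons]
    simp only [List.foldl_cons, List.filter_cons]
    by_cases h : PySem.List.pyGetD sd (s : Int) true
    · simp [h, ih]
    · simp [h, ih]

lemma rowFoldRange (sd : List Bool) (row : List (Option String)) :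
    (PySem.List.enumerate row 0).foldl
        (fun new_row p =>
          if PySem.List.pyGetD sd p.1 true then new_row else new_row ++ [p.2.getD ""])
        ([] : List String)
      = ((List.range row.length).filter (fun k => !(sd.getD k true))).map
          (fun k => (row.getD k none).getD "") := by
  rw [rowFold, PySem.List.enumerate_eq_map_pyRange row none]
  simp [PySem.List.len, PySem.List.pyRange_zero_natCast,
    List.filter_map, List.map_map, Function.comp_def]

lemma mapRangeGetD (row : List (Option String)) :
    (List.range row.length).map (fun k => (row.getD k none).getD "")
      = row.map (fun c => c.getD "") := by
  apply List.ext_getElem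
  · simp
  · intro i h1 h2
    have h1' : i < row.length := by simpa using h1
    simp [List.getD_eq_getElem?_getD, h1']

lemma minFold (t : List (List (Option String))) (n : Nat) (h : ∀ row ∈ t, row.length = n) :
    t.foldl (fun acc row => min acc row.length) n = n := by
  induction t with
  | nil => rfl
  | cons row t ih =>
    rw [List.foldl_cons, h row (by simp), min_self]
    exact ih (fun r hr => h r (by simp [hr]))

-- ===== VERDICT (by name: the statement is the Claim_ definition above) =====
theorem prepare_table_spec : Claim_equal_prepare_table := by
  intro table d _ hpre
  unfold Spec_prepare_table
  match table with
  | [] => cases d <;> rfl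
  | r :: rest =>
    unfold Pre_prepare_table at hpre
    simp only [List.headD_cons] at hpre
    cases d with
    | false =>
      simp only [prepare_table, prepare_table_alt, Bool.false_eq_true, if_false,
        Bool.not_false, if_true]
      rw [PySem.List.foldl_append_singleton_eq_map]
      apply List.map_congr_left
      intro row hrow
      have hlen : row.length ≤ r.length := by simpa using hpre row hrow
      rw [rowFoldRange]
      have hfilter :
          ((List.range row.length).filter
            (fun k => !((List.replicate r.length false).getD k true)))
            = List.range row.length := by
        apply List.filter_eq_self.mpr
        intro k hk
        have hk' : k < r.length := by
          have hk'' : k < row.length := by simpa using hk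
          omega
        simp [List.getD_eq_getElem?_getD, hk']
      rw [hfilter, mapRangeGetD]
    | true =>
      have hlen : ∀ row ∈ r :: rest, row.length = r.length := by
        intro row hrow; simpa using hpre row hrow
      simp only [prepare_table, prepare_table_alt, if_true, Bool.not_true, Bool.false_eq_true,
        if_false]
      rw [PySem.List.foldl_append_singleton_eq_map, minFold _ _ hlen]
      -- the mask entry at k < r.length says: some row has a value in column k
      have hmask : ∀ k ∈ List.range r.length,
          (!(((List.range r.length).foldl
            (fun sd i_column =>
              (r :: rest).foldl
                (fun sd row =>
                  if (row.getD i_column none).isSome then sd.set i_column false else sd) sd)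
            (List.replicate r.length true)).getD k true))
          = ((r :: rest).any fun row => (row.getD k none).isSome) := by
        intro k hkmem
        have hk : k < r.length := List.mem_range.mp hkmem
        rw [outerFold _ _ _ _ (by simpa using hk)]
        cases hP : ((r :: rest).any fun row => (row.getD k none).isSome) with
        | true =>
          rw [if_pos (show k ∈ List.range r.length ∧ true = true from ⟨hkmem, rfl⟩)]
          rfl
        | false =>
          simp [List.getD_eq_getElem?_getD, hk]
      -- both sides are indexed by the kept columns
      have hcols :
          (((List.range r.length).map
              (fun i => (r :: rest).map (fun row => row.getD i none))).filter
            (fun c => c.any (fun x => x.isSome)))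
          = ((List.range r.length).filter
              (fun i => (r :: rest).any (fun row => (row.getD i none).isSome))).map
              (fun i => (r :: rest).map (fun row => row.getD i none)) := by
        rw [List.filter_map]
        congr 1
        apply List.filter_congr
        intro i _
        simp [Function.comp_def, List.any_map]
      rw [hcols]
      apply List.ext_getElem
      · simp
      · intro j h1 h2
        simp only [List.nil_append, List.getElem_map, List.getElem_range]
        have hj : j < (r :: rest).length := by simpa using h1
        rw [rowFoldRange]
        have hrowlen : (r :: rest)[j].length = r.length := hlen _ (List.getElem_mem hj)
        rw [hrowlen, List.filter_congr hmask, List.map_map]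
        apply List.map_congr_left
        intro k hk
        have hkn : k < r.length := List.mem_range.mp (List.mem_of_mem_filter hk)
        simp only [Function.comp_def]
        have hmap : ((r :: rest).map (fun row => row.getD k none)).getD j none
            = (r :: rest)[j].getD k none := by
          rw [List.getD_eq_getElem?_getD, List.getElem?_map, List.getElem?_eq_getElem hj]
          simp
        rw [hmap]
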